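-- pv_equiv track=rewrite | github.com/boushib/leetcode | 1013-partition-array-into-three-parts-with-equal-sum.py | can_three_part_eq_sum
-- ===== SOURCE A (Python) =====
-- from typing import List
--
-- def can_three_part_eq_sum(nums: List[int]) -> bool:
--     s = sum(nums)
--     n = len(nums)
--
--     if s % 3 != 0:
--         return False
--
--     target_sum = s // 3
--     left_sum, right_sum = nums[0], nums[n - 1]
--     lo, hi = 1, n - 2
--
--     while lo < hi:
--         if lo < hi and left_sum != target_sum:
--             left_sum += nums[lo]
--             lo += 1
--         if lo < hi and right_sum != target_sum:
--             right_sum += nums[hi]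
--             hi -= 1
--
--         if left_sum == right_sum == target_sum:
--             return True
--
--     return False
-- ===== SOURCE B (Python) =====
-- def can_three_part_eq_sum(nums):
--     s = sum(nums)
--     if s % 3 != 0:
--         return False
--     target = s // 3
--     n = len(nums)
--     prefix = []
--     acc = 0
--     for x in nums:
--         acc += x
--         prefix.append(acc)
--     return any(
--         prefix[i] == target
--         and any(prefix[j] == 2 * target for j in range(i + 1, n - 1))
--         for i in range(n - 1)
--     )
-- ===== Notes on version B (the rewrite author's own statement) =====
-- stated objective: simpler
-- what changed: Replaced A's inward two-pointer convergence loop with a prefix-sum array plus a plain existential scan over the two cut points (any/any over ranges).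
-- intended difference: On length-3 lists whose three elements are equal, A returns False (its while loop 'lo < hi' never executes when lo = hi = 1) while B returns True, which is the intended answer since [x],[x],[x] is a valid partition into three equal-sum parts. — e.g. on can_three_part_eq_sum([0, 0, 0]): A returns false, B returns true
import Mathlib
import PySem

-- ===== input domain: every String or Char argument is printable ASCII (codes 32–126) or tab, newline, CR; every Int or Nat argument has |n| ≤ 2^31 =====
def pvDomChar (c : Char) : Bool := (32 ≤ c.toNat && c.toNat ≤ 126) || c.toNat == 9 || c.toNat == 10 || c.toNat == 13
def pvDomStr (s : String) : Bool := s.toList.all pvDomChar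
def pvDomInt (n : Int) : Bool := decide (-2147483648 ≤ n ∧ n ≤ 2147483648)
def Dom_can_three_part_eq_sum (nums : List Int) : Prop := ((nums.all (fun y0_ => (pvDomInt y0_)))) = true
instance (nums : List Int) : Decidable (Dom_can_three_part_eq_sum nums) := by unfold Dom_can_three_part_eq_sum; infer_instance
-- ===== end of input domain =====

-- B replaces A's two-pointer convergence with a prefix-sum array and an existential scan over the
-- two cut points (simpler to read; not faster). Equivalence is about the RETURN value; A raises on
-- [] (excluded by Pre_) and is wrong on all-equal triples (stated as the intended difference D_).

-- ===== PORT A =====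
-- element read nums[i]; exact for the in-range indices A uses (the default is only reached on [],
-- which Pre_ excludes)
def pvAGet (nums : List Int) (i : Int) : Int := (PySem.List.pyGet? nums i).getD 0

-- A's while-loop; the fuel only makes the loop total (fuel = nums.length is enough: hi - lo
-- strictly shrinks in every iteration that does not return)
def pvALoop (nums : List Int) (t : Int) (fuel : Nat) (lo hi L R : Int) : Bool :=
  match fuel with
  | 0 => false
  | fuel + 1 =>
    if lo < hi then
      let p1 : Int × Int := if L ≠ t then (L + pvAGet nums lo, lo + 1) else (L, lo)
      let p2 : Int × Int := if p1.2 < hi ∧ R ≠ t then (R + pvAGet nums hi, hi - 1) else (R, hi)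
      if p1.1 = t ∧ p2.1 = t then true
      else pvALoop nums t fuel p1.2 p2.2 p1.1 p2.1
    else false

def can_three_part_eq_sum (nums : List Int) : Bool :=
  let s := nums.sum
  let n : Int := nums.length
  if PySem.Int.mod s 3 ≠ 0 then false
  else
    pvALoop nums (PySem.Int.floordiv s 3) nums.length 1 (n - 2) (pvAGet nums 0) (pvAGet nums (n - 1))

-- ===== PORT B =====
def can_three_part_eq_sum_alt (nums : List Int) : Bool :=
  let s := nums.sum
  if PySem.Int.mod s 3 ≠ 0 then false
  else
    let target := PySem.Int.floordiv s 3
    let n : Int := nums.length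
    -- the accumulate-and-append loop building the prefix-sum list
    let st := nums.foldl (fun (st : Int × List Int) x => (st.1 + x, st.2 ++ [st.1 + x])) (0, ([] : List Int))
    let pref := st.2
    (PySem.List.pyRange 0 (n - 1) 1).any (fun i =>
      decide ((PySem.List.pyGet? pref i).getD 0 = target) &&
      (PySem.List.pyRange (i + 1) (n - 1) 1).any (fun j =>
        decide ((PySem.List.pyGet? pref j).getD 0 = 2 * target)))

-- ===== PRECONDITION & SPEC =====
-- Pre_ excludes only the empty list, on which A raises IndexError (it reads nums[0]).
def Pre_can_three_part_eq_sum (nums : List Int) : Prop := nums ≠ []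
instance (nums : List Int) : Decidable (Pre_can_three_part_eq_sum nums) := by unfold Pre_can_three_part_eq_sum; infer_instance
def pvWitness_can_three_part_eq_sum : List Int := [3, 0, 3, 3]

-- On length-3 lists with three equal elements A returns False (its while loop 'lo < hi' never
-- executes when lo = hi = 1) while B returns True, the intended answer: [x],[x],[x] is a valid
-- partition into three equal-sum parts.
def D_can_three_part_eq_sum (nums : List Int) : Prop :=
  nums.length = 3 ∧ nums.IsChain (· = ·)
instance (nums : List Int) : Decidable (D_can_three_part_eq_sum nums) := by unfold D_can_three_part_eq_sum; infer_instance

def Spec_can_three_part_eq_sum (nums : List Int) (out : Bool) : Prop :=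
  ¬ D_can_three_part_eq_sum nums → out = can_three_part_eq_sum_alt nums
instance (nums : List Int) (out : Bool) : Decidable (Spec_can_three_part_eq_sum nums out) := by unfold Spec_can_three_part_eq_sum; infer_instance

def pvDiffWitness_can_three_part_eq_sum : List Int := [0, 0, 0]
def pvDiffWitnessOut_can_three_part_eq_sum : Bool × Bool := (false, true)

-- ===== CLAIM (what is proved, stated in full; the proofs are below) =====
def Claim_unchanged_can_three_part_eq_sum : Prop := ∀ (nums : List Int), Dom_can_three_part_eq_sum nums → Pre_can_three_part_eq_sum nums → Spec_can_three_part_eq_sum nums (can_three_part_eq_sum nums)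
def Claim_changed_can_three_part_eq_sum : Prop := Dom_can_three_part_eq_sum (pvDiffWitness_can_three_part_eq_sum) ∧ Pre_can_three_part_eq_sum (pvDiffWitness_can_three_part_eq_sum) ∧ D_can_three_part_eq_sum (pvDiffWitness_can_three_part_eq_sum) ∧ can_three_part_eq_sum (pvDiffWitness_can_three_part_eq_sum) = pvDiffWitnessOut_can_three_part_eq_sum.1 ∧ can_three_part_eq_sum_alt (pvDiffWitness_can_three_part_eq_sum) = pvDiffWitnessOut_can_three_part_eq_sum.2 ∧ pvDiffWitnessOut_can_three_part_eq_sum.1 ≠ pvDiffWitnessOut_can_three_part_eq_sum.2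
def Claim_exact_can_three_part_eq_sum : Prop := ∀ (nums : List Int), Dom_can_three_part_eq_sum nums → Pre_can_three_part_eq_sum nums → D_can_three_part_eq_sum nums → can_three_part_eq_sum nums ≠ can_three_part_eq_sum_alt nums

-- ===== LEMMAS AND PROOFS =====

-- prefix sum of the first k elements (k as an Int, clamped at 0 / length as take does)
def pvP (nums : List Int) (k : Int) : Int := ((nums.take k.toNat).sum : Int)

theorem pvP_succ (nums : List Int) (k : Int) (h0 : 0 ≤ k) (h : k < nums.length) :
    pvP nums (k + 1) = pvP nums k + pvAGet nums k := by
  have hk : (k + 1).toNat = k.toNat + 1 := by omega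
  have hlt : k.toNat < nums.length := by omega
  unfold pvP pvAGet
  rw [hk]
  simp [PySem.List.pyGet?_of_nonneg nums h0, List.getElem?_eq_getElem hlt]
  exact List.sum_take_succ nums k.toNat hlt

-- the splittability condition both loops decide (with s = 3*t)
def pvSp (nums : List Int) (t : Int) : Prop :=
  ∃ i j : Int, 1 ≤ i ∧ i < j ∧ j ≤ (nums.length : Int) - 1 ∧ pvP nums i = t ∧ pvP nums j = 2 * t

theorem pvALoop_false_of_not_lt (nums : List Int) (t : Int) (fuel : Nat) (lo hi L R : Int)
    (h : ¬ lo < hi) : pvALoop nums t fuel lo hi L R = false := by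
  cases fuel <;> simp [pvALoop, h]

-- one unfolding of the loop body (lo < hi), with both branch conditions decided
theorem pvALoop_step (nums : List Int) (t : Int) (fuel : Nat) (lo hi L R : Int) (hlh : lo < hi) :
    pvALoop nums t (fuel + 1) lo hi L R =
      (if L ≠ t then
         (if lo + 1 < hi ∧ R ≠ t then
            (if L + pvAGet nums lo = t ∧ R + pvAGet nums hi = t then true
             else pvALoop nums t fuel (lo + 1) (hi - 1) (L + pvAGet nums lo) (R + pvAGet nums hi))
          else (if L + pvAGet nums lo = t ∧ R = t then true
             else pvALoop nums t fuel (lo + 1) hi (L + pvAGet nums lo) R))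
       else
         (if lo < hi ∧ R ≠ t then
            (if L = t ∧ R + pvAGet nums hi = t then true
             else pvALoop nums t fuel lo (hi - 1) L (R + pvAGet nums hi))
          else (if L = t ∧ R = t then true else pvALoop nums t fuel lo hi L R))) := by
  by_cases hLt : L ≠ t <;> simp only [pvALoop, if_pos hlh, hLt] <;> split_ifs <;> simp_all

-- one loop step, seen through the invariants L = pvP lo, R = s - pvP (hi+1)
theorem pvStep (nums : List Int) (t : Int) (fuel : Nat) (lo hi L R : Int)
    (hlh : lo < hi)
    (hL : L = pvP nums lo) (hR : R = nums.sum - pvP nums (hi + 1))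
    (h1 : 1 ≤ lo) (h2 : hi ≤ (nums.length : Int) - 2) :
    ∃ lo1 hi1 : Int,
      pvALoop nums t (fuel + 1) lo hi L R =
        (if pvP nums lo1 = t ∧ nums.sum - pvP nums (hi1 + 1) = t then true
         else pvALoop nums t fuel lo1 hi1 (pvP nums lo1) (nums.sum - pvP nums (hi1 + 1))) ∧
      lo ≤ lo1 ∧ lo1 ≤ hi1 ∧ hi1 ≤ hi ∧
      (lo1 = lo ∨ (lo1 = lo + 1 ∧ pvP nums lo ≠ t)) ∧
      (hi1 = hi ∨ (hi1 = hi - 1 ∧ nums.sum - pvP nums (hi + 1) ≠ t)) ∧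
      (lo1 = lo ∧ hi1 = hi → pvALoop nums t (fuel + 1) lo hi L R = true) := by
  have hlen : lo < (nums.length : Int) := by omega
  have hhilen : hi < (nums.length : Int) := by omega
  have hPlo : pvP nums (lo + 1) = pvP nums lo + pvAGet nums lo := pvP_succ nums lo (by omega) hlen
  have hPhi : pvP nums (hi + 1) = pvP nums hi + pvAGet nums hi := pvP_succ nums hi (by omega) hhilen
  rw [pvALoop_step nums t fuel lo hi L R hlh]
  by_cases hLt : L ≠ t
  · by_cases hc : lo + 1 < hi ∧ R ≠ t
    · refine ⟨lo + 1, hi - 1, ?_, by omega, by omega, by omega,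
        Or.inr ⟨rfl, by rw [← hL]; exact hLt⟩,
        Or.inr ⟨rfl, by rw [← hR]; exact hc.2⟩, by intro h; exact absurd h.1 (by omega)⟩
      rw [if_pos hLt, if_pos hc]
      have e0 : hi - 1 + 1 = hi := by ring
      have e1 : nums.sum - pvP nums (hi - 1 + 1) = R + pvAGet nums hi := by rw [e0]; omega
      have e2 : pvP nums (lo + 1) = L + pvAGet nums lo := by omega
      rw [e1, e2]
    · refine ⟨lo + 1, hi, ?_, by omega, by omega, by omega,
        Or.inr ⟨rfl, by rw [← hL]; exact hLt⟩, Or.inl rfl, by intro h; exact absurd h.1 (by omega)⟩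
      rw [if_pos hLt, if_neg hc]
      have e2 : pvP nums (lo + 1) = L + pvAGet nums lo := by omega
      rw [e2, ← hR]
  · rw [if_neg hLt]
    rw [not_not] at hLt
    by_cases hc : lo < hi ∧ R ≠ t
    · refine ⟨lo, hi - 1, ?_, by omega, by omega, by omega, Or.inl rfl,
        Or.inr ⟨rfl, by rw [← hR]; exact hc.2⟩, by intro h; exact absurd h.2 (by omega)⟩
      rw [if_pos hc]
      have e0 : hi - 1 + 1 = hi := by ring
      have e1 : nums.sum - pvP nums (hi - 1 + 1) = R + pvAGet nums hi := by rw [e0]; omega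
      rw [e1, ← hL, hLt]
    · have hRt : R = t := by
        rcases not_and_or.mp hc with h | h
        · exact absurd hlh h
        · exact not_not.mp h
      refine ⟨lo, hi, ?_, by omega, by omega, by omega, Or.inl rfl, Or.inl rfl, ?_⟩
      · rw [if_neg hc, ← hL, ← hR, hLt, hRt]
      · intro _
        rw [if_neg hc, hLt, hRt]
        simp

theorem pvALoop_sound (nums : List Int) (t : Int) (hs : nums.sum = 3 * t) :
    ∀ (fuel : Nat) (lo hi L R : Int), 1 ≤ lo → hi ≤ (nums.length : Int) - 2 →
    L = pvP nums lo → R = nums.sum - pvP nums (hi + 1) →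
    pvALoop nums t fuel lo hi L R = true → pvSp nums t := by
  intro fuel
  induction fuel with
  | zero => intro lo hi L R _ _ _ _ htrue; simp [pvALoop] at htrue
  | succ fuel ih =>
    intro lo hi L R h1 h2 hL hR htrue
    by_cases hlh : lo < hi
    · obtain ⟨lo1, hi1, heq, hll, hmid, hhh, _, _, _⟩ :=
        pvStep nums t fuel lo hi L R hlh hL hR h1 h2
      rw [heq] at htrue
      by_cases hchk : pvP nums lo1 = t ∧ nums.sum - pvP nums (hi1 + 1) = t
      · exact ⟨lo1, hi1 + 1, by omega, by omega, by omega, hchk.1, by omega⟩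
      · rw [if_neg hchk] at htrue
        exact ih lo1 hi1 _ _ (by omega) (by omega) rfl rfl htrue
    · rw [pvALoop_false_of_not_lt nums t (fuel + 1) lo hi L R hlh] at htrue
      exact absurd htrue (by simp)

theorem pvALoop_complete (nums : List Int) (t : Int) (hs : nums.sum = 3 * t) :
    ∀ (fuel : Nat) (lo hi L R : Int), (hi - lo).toNat < fuel → 1 ≤ lo → lo < hi →
    hi ≤ (nums.length : Int) - 2 →
    L = pvP nums lo → R = nums.sum - pvP nums (hi + 1) →
    (∃ i j : Int, lo ≤ i ∧ i < j ∧ j ≤ hi + 1 ∧ pvP nums i = t ∧ pvP nums j = 2 * t) →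
    pvALoop nums t fuel lo hi L R = true := by
  intro fuel
  induction fuel with
  | zero => intro lo hi L R hf; omega
  | succ fuel ih =>
    intro lo hi L R hf h1 hlh h2 hL hR hsplit
    obtain ⟨lo1, hi1, heq, hll, hmid, hhh, hmvl, hmvr, hnomove⟩ :=
      pvStep nums t fuel lo hi L R hlh hL hR h1 h2
    by_cases hchk : pvP nums lo1 = t ∧ nums.sum - pvP nums (hi1 + 1) = t
    · rw [heq, if_pos hchk]
    · by_cases hmv : lo1 = lo ∧ hi1 = hi
      · exact hnomove hmv
      · obtain ⟨i, j, hi1', hij, hjhi, hPi, hPj⟩ := hsplit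
        have hi_lo1 : lo1 ≤ i := by
          rcases hmvl with h | ⟨h, hne⟩
          · omega
          · have : i ≠ lo := fun h' => hne (h' ▸ hPi)
            omega
        have hj_hi1 : j ≤ hi1 + 1 := by
          rcases hmvr with h | ⟨h, hne⟩
          · omega
          · have : j ≠ hi + 1 := by
              intro h'
              exact hne (by rw [← h', hPj]; omega)
            omega
        have hlo1hi1 : lo1 < hi1 := by
          by_cases heq1 : lo1 = hi1
          · exfalso
            have hi_eq : i = lo1 := by omega
            have hj_eq : j = hi1 + 1 := by omega
            exact hchk ⟨hi_eq ▸ hPi, by rw [← hj_eq, hPj]; omega⟩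
          · omega
        rw [heq, if_neg hchk]
        exact ih lo1 hi1 _ _ (by omega) (by omega) hlo1hi1 (by omega) rfl rfl
          ⟨i, j, hi_lo1, hij, hj_hi1, hPi, hPj⟩

-- the prefix-sum list B's loop builds, and what the foldl computes
def pvPrefList (c : Int) : List Int → List Int
  | [] => []
  | x :: xs => (c + x) :: pvPrefList (c + x) xs

theorem pvFoldl_prefList (xs : List Int) : ∀ (c : Int) (l : List Int),
    xs.foldl (fun (st : Int × List Int) x => (st.1 + x, st.2 ++ [st.1 + x])) (c, l)
      = (c + xs.sum, l ++ pvPrefList c xs) := by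
  induction xs with
  | nil => intro c l; simp [pvPrefList]
  | cons x xs ih =>
    intro c l
    rw [List.foldl_cons, ih (c + x) (l ++ [c + x])]
    simp only [pvPrefList, Prod.mk.injEq, List.append_assoc, List.cons_append, List.nil_append,
      List.sum_cons]
    exact ⟨by ring, by simp⟩

theorem pvPrefList_getElem? : ∀ (xs : List Int) (c : Int) (k : Nat), k < xs.length →
    (pvPrefList c xs)[k]? = some (c + (xs.take (k + 1)).sum) := by
  intro xs
  induction xs with
  | nil => intro c k h; simp at h
  | cons x xs ih =>
    intro c k h
    cases k with
    | zero => simp [pvPrefList]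
    | succ k =>
      simp only [pvPrefList, List.getElem?_cons_succ]
      rw [ih (c + x) k (by simpa using h)]
      congr 1
      simp [List.take_succ_cons]
      ring

theorem pvPrefList_get (nums : List Int) (i : Int) (h0 : 0 ≤ i) (hl : i < (nums.length : Int)) :
    (PySem.List.pyGet? (pvPrefList 0 nums) i).getD 0 = pvP nums (i + 1) := by
  rw [PySem.List.pyGet?_of_nonneg _ h0, pvPrefList_getElem? nums 0 i.toNat (by omega)]
  simp only [Option.getD_some]
  unfold pvP
  rw [show (i + 1).toNat = i.toNat + 1 by omega]
  ring

theorem pvB_iff (nums : List Int) (t : Int) (hmod : PySem.Int.mod nums.sum 3 = 0)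
    (ht : t = PySem.Int.floordiv nums.sum 3) :
    can_three_part_eq_sum_alt nums = true ↔ pvSp nums t := by
  unfold can_three_part_eq_sum_alt
  rw [if_neg (not_not_intro hmod), pvFoldl_prefList nums 0 []]
  simp only [List.nil_append, ← ht, List.any_eq_true, Bool.and_eq_true, decide_eq_true_eq,
    PySem.List.mem_pyRange_one]
  constructor
  · rintro ⟨i, ⟨h0i, hin⟩, hPi, j, ⟨hij, hjn⟩, hPj⟩
    rw [pvPrefList_get nums i h0i (by omega)] at hPi
    rw [pvPrefList_get nums j (by omega) (by omega)] at hPj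
    exact ⟨i + 1, j + 1, by omega, by omega, by omega, hPi, hPj⟩
  · rintro ⟨i, j, h1i, hij, hjn, hPi, hPj⟩
    refine ⟨i - 1, ⟨by omega, by omega⟩, ?_, j - 1, ⟨by omega, by omega⟩, ?_⟩
    · rw [pvPrefList_get nums (i - 1) (by omega) (by omega), show i - 1 + 1 = i by ring]
      exact hPi
    · rw [pvPrefList_get nums (j - 1) (by omega) (by omega), show j - 1 + 1 = j by ring]
      exact hPj

-- ===== VERDICT (by name: the statement is the Claim_ definition above) =====
theorem can_three_part_eq_sum_spec : Claim_unchanged_can_three_part_eq_sum := by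
  intro nums _ hpre hnd
  show can_three_part_eq_sum nums = can_three_part_eq_sum_alt nums
  by_cases hmod : PySem.Int.mod nums.sum 3 = 0
  · set t := PySem.Int.floordiv nums.sum 3 with ht
    have hs : nums.sum = 3 * t := by
      have h := PySem.Int.floordiv_mul_add_mod nums.sum 3
      omega
    have hA : can_three_part_eq_sum nums =
        pvALoop nums t nums.length 1 ((nums.length : Int) - 2) (pvAGet nums 0)
          (pvAGet nums ((nums.length : Int) - 1)) := by
      simp only [can_three_part_eq_sum]
      rw [if_neg (not_not_intro hmod)]
    have hBiff := pvB_iff nums t hmod ht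
    have hlen1 : (1 : Int) ≤ (nums.length : Int) := by
      have : nums ≠ [] := hpre
      have : 0 < nums.length := List.length_pos_iff.mpr this
      omega
    by_cases h4 : 4 ≤ nums.length
    · have h4' : (4 : Int) ≤ (nums.length : Int) := by exact_mod_cast h4
      have hL0 : pvAGet nums 0 = pvP nums 1 := by
        have h := pvP_succ nums 0 le_rfl (by omega)
        have h0 : pvP nums 0 = 0 := by simp [pvP]
        norm_num at h
        omega
      have hPn : pvP nums ((nums.length : Int)) = nums.sum := by
        simp [pvP]
      have hR0 : pvAGet nums ((nums.length : Int) - 1) =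
          nums.sum - pvP nums (((nums.length : Int) - 2) + 1) := by
        have h := pvP_succ nums ((nums.length : Int) - 1) (by omega) (by omega)
        rw [show ((nums.length : Int) - 1 + 1) = ((nums.length : Int)) by ring, hPn] at h
        rw [show ((nums.length : Int) - 2 + 1) = (nums.length : Int) - 1 by ring]
        omega
      have hAiff : can_three_part_eq_sum nums = true ↔ pvSp nums t := by
        constructor
        · intro h
          exact pvALoop_sound nums t hs nums.length 1 ((nums.length : Int) - 2) _ _ le_rfl
            (by omega) hL0 hR0 (hA ▸ h)
        · intro hsp
          rw [hA]
          apply pvALoop_complete nums t hs nums.length 1 ((nums.length : Int) - 2) _ _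
            (by omega) le_rfl (by omega) (by omega) hL0 hR0
          obtain ⟨i, j, hi, hij, hj, hPi, hPj⟩ := hsp
          exact ⟨i, j, hi, hij, by omega, hPi, hPj⟩
      rw [Bool.eq_iff_iff, hAiff, hBiff]
    · have h3 : (nums.length : Int) ≤ 3 := by exact_mod_cast Nat.le_of_lt_succ (by omega)
      have hA3 : can_three_part_eq_sum nums = false := by
        rw [hA]
        exact pvALoop_false_of_not_lt nums t nums.length 1 ((nums.length : Int) - 2)
          (pvAGet nums 0) (pvAGet nums ((nums.length : Int) - 1)) (by omega)
      have hB3 : can_three_part_eq_sum_alt nums = false := by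
        cases hb : can_three_part_eq_sum_alt nums with
        | false => rfl
        | true =>
          exfalso
          obtain ⟨i, j, hi, hij, hj, hPi, hPj⟩ := hBiff.mp hb
          have hn3 : nums.length = 3 := by omega
          obtain ⟨a, b, c, rfl⟩ := List.length_eq_three.mp hn3
          have hi1 : i = 1 := by
            have : ((3:Nat) : Int) = 3 := by norm_num
            omega
          have hj2 : j = 2 := by
            have : ((3:Nat) : Int) = 3 := by norm_num
            omega
          subst hi1; subst hj2
          have hP1 : pvP [a, b, c] 1 = a := by simp [pvP]
          have hP2 : pvP [a, b, c] 2 = a + b := by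
            simp [pvP]
            try omega
          have hsum3 : a + b + c = 3 * t := by
            have : ([a, b, c] : List Int).sum = a + b + c := by simp; ring
            omega
          exact hnd ⟨by simp, by
            simp only [List.isChain_cons_cons, List.isChain_singleton, and_true]
            omega⟩
      rw [hA3, hB3]
  · simp only [can_three_part_eq_sum, can_three_part_eq_sum_alt]
    rw [if_pos hmod, if_pos hmod]

theorem can_three_part_eq_sum_changed : Claim_changed_can_three_part_eq_sum := by
  unfold Claim_changed_can_three_part_eq_sum; decide

theorem can_three_part_eq_sum_tight : Claim_exact_can_three_part_eq_sum := by
  intro nums _ _ hd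
  obtain ⟨hlen, hch⟩ := hd
  obtain ⟨a, b, c, rfl⟩ := List.length_eq_three.mp hlen
  simp only [List.isChain_cons_cons, List.isChain_singleton, and_true] at hch
  obtain ⟨hab, hbc⟩ := hch
  subst hab; subst hbc
  have hsum : ([a, a, a] : List Int).sum = 3 * a := by simp; ring
  have hmod : PySem.Int.mod ([a, a, a] : List Int).sum 3 = 0 := by
    rw [hsum, PySem.Int.mod_eq_zero_iff_dvd]
    exact ⟨a, rfl⟩
  have ht : a = PySem.Int.floordiv ([a, a, a] : List Int).sum 3 := by
    have h := PySem.Int.floordiv_mul_add_mod ([a, a, a] : List Int).sum 3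
    omega
  have hA : can_three_part_eq_sum [a, a, a] = false := by
    unfold can_three_part_eq_sum
    rw [if_neg (not_not_intro hmod)]
    apply pvALoop_false_of_not_lt
    norm_num
  have hB : can_three_part_eq_sum_alt [a, a, a] = true := by
    rw [pvB_iff [a, a, a] a hmod ht]
    refine ⟨1, 2, by norm_num, by norm_num, by norm_num, ?_, ?_⟩
    · simp [pvP]
      try omega
    · simp [pvP]
      try omega
  rw [hA, hB]
  simp
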